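-- pv_equiv track=rewrite | github.com/lialsoftlab/epson_24pin_matrix_printer_checker | main.py | encode2raster
-- ===== SOURCE A (Python) =====
-- from functools import reduce
--
-- def get_max(iterable, func):
--     return reduce(
--         lambda x, y: max(x, y),
--         map(lambda x: func(x), iterable),
--         0
--     )
--
-- def encode2raster(raster):
--     width = get_max(raster, len)
--     height = len(raster)
--
--     raster = [[1 if z == '*' else 0 for z in y] for y in [f"{x:{width}s}" for x in raster]]
--     columns = [[0 for y in range(height // 8 + (1 if height % 8 else 0))] for x in range(width)]
--
--     pwr = 7
--     for n, line in enumerate(raster):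
--         octet = n // 8
--         wgt = 1 << pwr
--         columns = [[wgt * bit + val if i == octet else val for i, val in enumerate(bytes)] for bit, bytes in zip(line, columns)]
--         pwr = pwr-1 if pwr > 0 else 7
--
--     return columns
-- ===== SOURCE B (Python) =====
-- def encode2raster(raster):
--     width = max(map(len, raster), default=0)
--     height = len(raster)
--     noct = height // 8 + (1 if height % 8 else 0)
--     columns = []
--     for x in range(width):
--         bits = [1 if x < len(row) and row[x] == '*' else 0 for row in raster]
--         columns.append([
--             sum(bits[8 * k + i] << (7 - i) for i in range(8) if 8 * k + i < height)
--             for k in range(noct)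
--         ])
--     return columns
-- ===== Notes on version B (the rewrite author's own statement) =====
-- stated objective: faster
-- what changed: Instead of padding every row and rebuilding the entire width x noct column matrix once per row, B makes one column-major pass that computes each octet directly from its (at most eight) row bits.
import Mathlib
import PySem

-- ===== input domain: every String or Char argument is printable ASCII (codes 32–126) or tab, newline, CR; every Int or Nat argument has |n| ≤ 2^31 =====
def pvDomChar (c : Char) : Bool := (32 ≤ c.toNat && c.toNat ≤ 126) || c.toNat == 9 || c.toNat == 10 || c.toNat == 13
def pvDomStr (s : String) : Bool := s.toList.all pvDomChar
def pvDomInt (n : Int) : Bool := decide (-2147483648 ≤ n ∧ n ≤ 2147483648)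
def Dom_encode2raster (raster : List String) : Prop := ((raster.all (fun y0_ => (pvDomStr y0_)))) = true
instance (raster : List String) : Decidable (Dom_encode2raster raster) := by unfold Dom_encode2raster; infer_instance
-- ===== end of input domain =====

-- B replaces A's per-row rebuild of the whole column matrix by a single direct column-major
-- pass that computes each octet from its eight row-bits; objective: faster (asymptotic).

-- ===== PORT A =====
-- get_max(iterable, len): reduce(max, map(len, xs), 0); Python len is a nonnegative int, ported as Nat (exact).
def getMax (xs : List String) (f : String → Nat) : Nat :=
  (xs.map f).foldl (fun x y => max x y) 0

-- f"{x:{width}s}" left-justifies x in a field of `width` spaces (exact for width ≥ 0, which holds here).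
def padTo (w : Nat) (s : String) : List Char :=
  s.toList ++ List.replicate (w - s.toList.length) ' '

-- one step of A's `for n, line in enumerate(raster)` loop body
def stepA (st : List (List Int) × Nat) (p : Int × List Int) : List (List Int) × Nat :=
  let cols := st.1
  let pwr := st.2
  let octet := PySem.Int.floordiv p.1 8
  let wgt : Int := (1 : Int) <<< pwr          -- 1 << pwr
  ((p.2.zip cols).map (fun bb =>
      (PySem.List.enumerate bb.2 0).map (fun iv =>
        if iv.1 = octet then wgt * bb.1 + iv.2 else iv.2)),
   if pwr > 0 then pwr - 1 else 7)

def encode2raster (raster : List String) : List (List Int) :=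
  let width := getMax raster (fun s => s.toList.length)
  let height := raster.length
  let raster2 := raster.map (fun y => (padTo width y).map (fun z => if z = '*' then (1 : Int) else 0))
  let columns := (List.range width).map (fun _ =>
    (List.range (height / 8 + (if height % 8 ≠ 0 then 1 else 0))).map (fun _ => (0 : Int)))
  ((PySem.List.enumerate raster2 0).foldl stepA (columns, 7)).1

-- ===== PORT B =====
-- `x < len(row) and row[x] == '*'` is exactly `row[x:x+1]`'s safe get: pyGet? row x = some '*'
def bitOf (row : String) (x : Nat) : Int :=
  if PySem.Str.pyGet? row (x : Int) = some '*' then 1 else 0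

def encode2raster_alt (raster : List String) : List (List Int) :=
  let width := (raster.map (fun s => s.toList.length)).foldl (fun x y => max x y) 0  -- max(map(len, raster), default=0)
  let height := raster.length
  let noct := height / 8 + (if height % 8 ≠ 0 then 1 else 0)
  (List.range width).foldl (fun acc x =>
    let bits := raster.map (fun row => bitOf row x)
    acc ++ [(List.range noct).map (fun k =>
      (((List.range 8).filter (fun i => 8 * k + i < height)).map
        (fun i => bits.getD (8 * k + i) 0 <<< (7 - i))).sum)]) []

-- ===== PRECONDITION & SPEC =====
def Spec_encode2raster (raster : List String) (out : List (List Int)) : Prop := out = encode2raster_alt raster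
instance (raster : List String) (out : List (List Int)) : Decidable (Spec_encode2raster raster out) := by unfold Spec_encode2raster; infer_instance

-- ===== CLAIM (what is proved, stated in full; the proofs are below) =====
def Claim_equal_encode2raster : Prop := ∀ (raster : List String), Dom_encode2raster raster → Spec_encode2raster raster (encode2raster raster)

-- ===== LEMMAS AND PROOFS =====

-- contribution of rows L (starting at global row index n) to column x, octet k
def contrib (n : Nat) (L : List (List Int)) (x k : Nat) : Int :=
  match L with
  | [] => 0
  | l :: L' => (if n / 8 = k then ((1 : Int) <<< (7 - n % 8)) * l.getD x 0 else 0) + contrib (n + 1) L' x k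

theorem stepA_eq (line : List Int) (W K : Nat) (f : Nat → Nat → Int) (n : Nat) (pwr : Nat)
    (hl : line.length = W) :
    stepA ((List.range W).map (fun x => (List.range K).map (f x)), pwr) ((n : Int), line)
    = ((List.range W).map (fun x => (List.range K).map (fun k =>
        if k = n / 8 then ((1 : Int) <<< pwr) * line.getD x 0 + f x k else f x k)),
       if pwr > 0 then pwr - 1 else 7) := by
  unfold stepA
  simp only [Prod.mk.injEq]
  refine ⟨?_, trivial⟩
  apply List.ext_getElem
  · simp [hl]
  · intro x hx1 hx2
    simp only [List.getElem_map, List.getElem_zip, List.getElem_range]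
    apply List.ext_getElem
    · simp [PySem.List.length_enumerate]
    · intro k hk1 hk2
      simp [PySem.List.getElem_enumerate]
      have hx : x < line.length := by rw [hl]; simpa using hx2
      have hdiv : ((n : Int)) / 8 = ((n / 8 : Nat) : Int) := by omega
      simp only [List.getElem?_eq_getElem hx, Option.getD_some, hdiv, Nat.cast_inj]

theorem fold_inv (W K : Nat) (L : List (List Int)) (n : Nat) (f : Nat → Nat → Int)
    (hL : ∀ l ∈ L, l.length = W) :
    ((PySem.List.enumerate L (n : Int)).foldl stepA
        ((List.range W).map (fun x => (List.range K).map (f x)), 7 - n % 8)).1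
    = (List.range W).map (fun x => (List.range K).map (fun k => f x k + contrib n L x k)) := by
  induction L generalizing n f with
  | nil => simp [PySem.List.enumerate, contrib]
  | cons l L' ih =>
    have hw : l.length = W := hL l (by simp)
    rw [PySem.List.enumerate_cons]
    simp only [List.foldl_cons]
    rw [stepA_eq l W K f n (7 - n % 8) hw]
    have hp : (if 7 - n % 8 > 0 then (7 - n % 8) - 1 else 7) = 7 - (n + 1) % 8 := by split_ifs <;> omega
    have hcast : ((n : Int)) + 1 = ((n + 1 : Nat) : Int) := by push_cast; ring
    rw [hp, hcast, ih (n + 1) _ (fun l hl => hL l (by simp [hl]))]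
    apply List.map_congr_left; intro x _
    apply List.map_congr_left; intro k _
    by_cases h : k = n / 8
    · subst h; simp [contrib]; ring
    · have h' : ¬ (n / 8 = k) := fun hh => h hh.symm
      simp [contrib, h, h']

theorem contrib_eq_sum (L : List (List Int)) (n x k : Nat) :
    contrib n L x k
    = ∑ j ∈ Finset.range L.length,
        (if (n + j) / 8 = k then ((1 : Int) <<< (7 - (n + j) % 8)) * (L.getD j []).getD x 0 else 0) := by
  induction L generalizing n with
  | nil => simp [contrib]
  | cons l L' ih =>
    simp only [contrib, List.length_cons, Finset.sum_range_succ', List.getD_cons_succ,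
      List.getD_cons_zero, Nat.add_zero]
    have hs : (∑ j ∈ Finset.range L'.length,
          (if (n + 1 + j) / 8 = k then ((1 : Int) <<< (7 - (n + 1 + j) % 8)) * (L'.getD j []).getD x 0 else 0))
        = ∑ j ∈ Finset.range L'.length,
          (if (n + (j + 1)) / 8 = k then ((1 : Int) <<< (7 - (n + (j + 1)) % 8)) * (L'.getD j []).getD x 0 else 0) :=
      Finset.sum_congr rfl (fun j _ => by rw [show n + (j + 1) = n + 1 + j by ring])
    rw [ih (n + 1), hs]
    exact add_comm _ _

theorem octet_sum (H k : Nat) (g : Nat → Int) :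
    (∑ j ∈ Finset.range H, (if j / 8 = k then g j else 0))
    = ∑ i ∈ Finset.range 8, (if 8 * k + i < H then g (8 * k + i) else 0) := by
  rw [← Finset.sum_filter, ← Finset.sum_filter]
  refine Finset.sum_nbij' (fun j => j % 8) (fun i => 8 * k + i) ?_ ?_ ?_ ?_ ?_
  · intro a ha; simp only [Finset.mem_filter, Finset.mem_range] at ha ⊢; omega
  · intro a ha; simp only [Finset.mem_filter, Finset.mem_range] at ha ⊢; omega
  · intro a ha; simp only [Finset.mem_filter, Finset.mem_range] at ha; beta_reduce; omega
  · intro a ha; simp only [Finset.mem_filter, Finset.mem_range] at ha; beta_reduce; omega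
  · intro a ha; simp only [Finset.mem_filter, Finset.mem_range] at ha
    beta_reduce; congr 1; omega

theorem bitrow_getD (W : Nat) (s : String) (x : Nat) (_hx : x < W) :
    ((padTo W s).map (fun z => if z = '*' then (1 : Int) else 0)).getD x 0 = bitOf s x := by
  unfold padTo bitOf
  rw [PySem.Str.pyGet?_natCast]
  by_cases hxs : x < s.toList.length
  · rw [List.getD_eq_getElem?_getD, List.getElem?_map, List.getElem?_append_left hxs,
        List.getElem?_eq_getElem hxs]
    simp
  · have h1 : s.toList.length ≤ x := Nat.le_of_not_lt hxs
    rw [List.getD_eq_getElem?_getD, List.getElem?_map, List.getElem?_append_right h1,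
        List.getElem?_replicate, List.getElem?_eq_none h1]
    split <;> simp

theorem sum_filter_map (l : List Nat) (q : Nat → Bool) (f : Nat → Int) :
    ((l.filter q).map f).sum = (l.map (fun i => if q i then f i else 0)).sum := by
  induction l with
  | nil => rfl
  | cons a l ih => cases hq : q a <;> simp [hq, ih]

theorem sum_map_range (n : Nat) (f : Nat → Int) :
    ((List.range n).map f).sum = ∑ i ∈ Finset.range n, f i := by
  induction n with
  | zero => rfl
  | succ n ih => rw [List.range_succ, Finset.sum_range_succ]; simp [ih]

-- ===== VERDICT (by name: the statement is the Claim_ definition above) =====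
theorem encode2raster_spec : Claim_equal_encode2raster := by
  unfold Claim_equal_encode2raster Spec_encode2raster
  intro raster _
  unfold encode2raster encode2raster_alt getMax
  dsimp only
  rw [PySem.List.foldl_append_singleton_eq_map]
  set W := (raster.map (fun s => s.toList.length)).foldl (fun x y => max x y) 0 with hW
  set H := raster.length with hH
  set K := H / 8 + (if H % 8 ≠ 0 then 1 else 0) with hK
  set bitrows := raster.map (fun y => (padTo W y).map (fun z => if z = '*' then (1 : Int) else 0))
    with hbr
  have hlen : ∀ l ∈ bitrows, l.length = W := by
    intro l hl
    rw [hbr] at hl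
    obtain ⟨s, hs, rfl⟩ := List.mem_map.mp hl
    have : s.toList.length ≤ W :=
      (PySem.List.le_foldl_max (raster.map (fun s => s.toList.length)) 0).2 _
        (List.mem_map.mpr ⟨s, hs, rfl⟩)
    simp only [String.length_toList] at this
    simp [padTo]; omega
  have h := fold_inv W K bitrows 0 (fun _ _ => 0) hlen
  simp only [Nat.zero_mod, Nat.sub_zero, Nat.cast_zero] at h
  rw [h]
  apply List.map_congr_left; intro x hx
  apply List.map_congr_left; intro k hk
  rw [List.mem_range] at hx
  rw [zero_add, contrib_eq_sum, sum_filter_map, sum_map_range]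
  simp only [Nat.zero_add]
  have hlb : bitrows.length = H := by simp [hbr, hH]
  rw [hlb, octet_sum H k (fun j => ((1 : Int) <<< (7 - j % 8)) * (bitrows.getD j []).getD x 0)]
  apply Finset.sum_congr rfl
  intro i hi
  rw [Finset.mem_range] at hi
  by_cases hin : 8 * k + i < H
  · simp only [hin, if_pos, decide_true]
    have hmod : (8 * k + i) % 8 = i := by omega
    have hrow : (bitrows.getD (8 * k + i) []).getD x 0
        = (raster.map (fun row => bitOf row x)).getD (8 * k + i) 0 := by
      have hji : 8 * k + i < raster.length := by rw [← hH]; exact hin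
      simp only [hbr, List.getD_eq_getElem?_getD, List.getElem?_map,
        List.getElem?_eq_getElem hji, Option.map_some, Option.getD_some]
      rw [← List.getElem?_map]
      exact bitrow_getD W _ x hx
    rw [hmod, hrow, Int.shiftLeft_eq, Int.shiftLeft_eq]
    ring
  · simp [hin]
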